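-- pv_equiv track=rewrite | github.com/deluhorse/champion | v1/module/champion/service.py | find_sample_num
-- ===== SOURCE A (Python) =====
-- def find_sample_num(touzi_list, count):
--     """
--     检查数组中是否存在count个相同的数，如果存在则移除数组
--     :param touzi:
--     :param count:
--     :return:
--     """
--     touzi_dict = {}
--     final_value = ''
--
--     for touzi in touzi_list:
--         if touzi not in touzi_dict:
--             touzi_dict[touzi] = 1
--         else:
--             touzi_dict[touzi] += 1
--
--     for key, value in touzi_dict.items():
--
--         if value == count:
--             final_value = key
--             break
--
--     return final_value
-- ===== SOURCE B (Python) =====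
-- def find_sample_num(touzi_list, count):
--     for i, touzi in enumerate(touzi_list):
--         if touzi not in touzi_list[:i] and touzi_list.count(touzi) == count:
--             return touzi
--     return ''
-- ===== Notes on version B (the rewrite author's own statement) =====
-- stated objective: simpler
-- what changed: Drops the frequency dict entirely: a single loop returns the first element with no earlier occurrence whose list.count equals count, preserving first-occurrence order and the '' default.
import Mathlib
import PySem

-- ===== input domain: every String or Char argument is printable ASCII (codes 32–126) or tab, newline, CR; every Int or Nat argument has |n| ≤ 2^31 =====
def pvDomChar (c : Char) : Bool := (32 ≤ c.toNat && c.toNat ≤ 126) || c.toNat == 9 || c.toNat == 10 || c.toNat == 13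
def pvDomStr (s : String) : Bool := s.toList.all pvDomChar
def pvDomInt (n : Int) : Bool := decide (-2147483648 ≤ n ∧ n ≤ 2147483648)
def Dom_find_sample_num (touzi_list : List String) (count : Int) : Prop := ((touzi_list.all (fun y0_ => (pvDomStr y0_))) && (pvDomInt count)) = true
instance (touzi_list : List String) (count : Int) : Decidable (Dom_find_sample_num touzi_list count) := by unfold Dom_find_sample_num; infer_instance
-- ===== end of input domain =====

-- B drops A's frequency dict: one loop returns the first not-yet-seen element whose total count equals `count` ('' default) — simpler, same values.


-- ===== PORT A =====
-- A's second loop: scan dict.items for the first value == count, '' if none (the break).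
def fsnScanItems (count : Int) : List (String × Int) → String
  | [] => ""
  | (key, value) :: rest => if value == count then key else fsnScanItems count rest

def find_sample_num (touzi_list : List String) (count : Int) : String :=
  let touzi_dict : PySem.Dict String Int :=
    touzi_list.foldl
      (fun d touzi =>
        if !(d.contains touzi) then d.insert touzi 1
        else d.modify touzi 0 (· + 1))
      PySem.Dict.empty
  fsnScanItems count touzi_dict.items

-- ===== PORT B =====
-- `seen` is exactly the prefix of the list already iterated over.
def fsnAltLoop (full : List String) (count : Int) (seen : List String) : List String → String
  | [] => ""
  | touzi :: rest =>
      if !(seen.contains touzi) && ((full.count touzi : Int) == count) then touzi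
      else fsnAltLoop full count (seen ++ [touzi]) rest

def find_sample_num_alt (touzi_list : List String) (count : Int) : String :=
  fsnAltLoop touzi_list count [] touzi_list

-- ===== PRECONDITION & SPEC =====
def Spec_find_sample_num (touzi_list : List String) (count : Int) (out : String) : Prop := out = find_sample_num_alt touzi_list count
instance (touzi_list : List String) (count : Int) (out : String) : Decidable (Spec_find_sample_num touzi_list count out) := by unfold Spec_find_sample_num; infer_instance

-- ===== CLAIM (what is proved, stated in full; the proofs are below) =====
def Claim_equal_find_sample_num : Prop := ∀ (touzi_list : List String) (count : Int), Dom_find_sample_num touzi_list count → Spec_find_sample_num touzi_list count (find_sample_num touzi_list count)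

-- ===== LEMMAS AND PROOFS =====

-- first element of a list satisfying p, '' if none
def fsnFirst (p : String → Bool) : List String → String
  | [] => ""
  | x :: r => if p x then x else fsnFirst p r

-- the elements of l not in `seen`, first occurrences in order
def fsnNew (seen : List String) : List String → List String
  | [] => []
  | x :: r => if x ∈ seen then fsnNew seen r else x :: fsnNew (seen ++ [x]) r

theorem fsnNew_congr (s₁ s₂ : List String) (l : List String)
    (h : ∀ y, y ∈ s₁ ↔ y ∈ s₂) : fsnNew s₁ l = fsnNew s₂ l := by
  induction l generalizing s₁ s₂ with
  | nil => rfl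
  | cons x r ih =>
      simp only [fsnNew]
      by_cases hx : x ∈ s₁
      · rw [if_pos hx, if_pos ((h x).1 hx)]
        exact ih s₁ s₂ h
      · rw [if_neg hx, if_neg (fun hx2 => hx ((h x).2 hx2))]
        refine congrArg _ (ih _ _ ?_)
        intro y; simp [h y]

theorem set_update_eq_append_fsnNew (l : List String) (s : List String) :
    PySem.Set.update s l = s ++ fsnNew s l := by
  induction l generalizing s with
  | nil => simp [PySem.Set.update, fsnNew]
  | cons x r ih =>
      simp only [PySem.Set.update, List.foldl_cons, fsnNew, PySem.Set.add] at *
      by_cases hx : x ∈ s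
      · rw [if_pos (by simpa using hx), if_pos hx]
        exact ih s
      · rw [if_neg (by simpa using hx), if_neg hx]
        rw [ih (s ++ [x])]
        simp

theorem fsnScanItems_map (xs : List String) (c : Int) (s : List String) :
    fsnScanItems c (s.map (fun k => (k, (xs.count k : Int)))) =
      fsnFirst (fun k => ((xs.count k : Int) == c)) s := by
  induction s with
  | nil => rfl
  | cons x r ih => simp only [List.map, fsnScanItems, fsnFirst, ih]

theorem fsnAltLoop_eq_fsnFirst (full : List String) (c : Int) (l seen : List String) :
    fsnAltLoop full c seen l =
      fsnFirst (fun k => ((full.count k : Int) == c)) (fsnNew seen l) := by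
  induction l generalizing seen with
  | nil => rfl
  | cons x r ih =>
      simp only [fsnAltLoop, fsnNew]
      by_cases hx : x ∈ seen
      · rw [if_pos hx]
        have hc : seen.contains x = true := by simpa using hx
        rw [hc]
        simp only [Bool.not_true, Bool.false_and, Bool.false_eq_true, if_false]
        rw [ih (seen ++ [x])]
        refine congrArg _ (fsnNew_congr _ _ _ ?_)
        intro y; simp only [List.mem_append, List.mem_singleton, or_iff_left_iff_imp]
        intro hy; subst hy; exact hx
      · rw [if_neg hx]
        have hc : seen.contains x = false := by simpa using hx
        rw [hc]
        simp only [Bool.not_false, Bool.true_and, fsnFirst]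
        by_cases hp : ((full.count x : Int) == c) = true
        · rw [if_pos hp, if_pos hp]
        · rw [if_neg hp, if_neg hp]
          exact ih (seen ++ [x])

theorem fsn_dict_eq_counter (touzi_list : List String) :
    touzi_list.foldl
      (fun d touzi =>
        if !(d.contains touzi) then d.insert touzi 1
        else d.modify touzi 0 (· + 1))
      PySem.Dict.empty = PySem.Dict.counter touzi_list := by
  rw [PySem.Dict.counter_eq_foldl]
  apply PySem.List.foldl_congr_mem
  intro d t _
  by_cases hc : d.contains t = true
  · rw [hc]; rfl
  · have hc' : d.contains t = false := by simpa using hc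
    rw [hc']
    simp [PySem.Dict.modify, PySem.Dict.getD_of_not_contains (h := hc')]

-- ===== VERDICT (by name: the statement is the Claim_ definition above) =====
theorem find_sample_num_spec : Claim_equal_find_sample_num := by
  intro touzi_list count _
  unfold Spec_find_sample_num find_sample_num find_sample_num_alt
  simp only []
  rw [fsn_dict_eq_counter, PySem.Dict.items_counter, fsnScanItems_map,
      fsnAltLoop_eq_fsnFirst]
  congr 1
  have h := set_update_eq_append_fsnNew touzi_list ([] : List String)
  simpa [PySem.Set.ofList_eq_foldl, PySem.Set.update] using h
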